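-- pv_equiv track=rewrite | github.com/arshinmar/UTEK2020 | part3.py | compute_DP_matrix
-- ===== SOURCE A (Python) =====
-- def compute_DP_matrix(s1, s2):
--     """
--     INPUT
--     ::array:: s1
--     ::array:: s2
--     OUTPUT
--     ::2D array:: dp
--     """
--     m=len(s1)
--     n=len(s2)
--     # Create a table to store results of subproblems
--     dp = []
--     for i in range(0,m+1,1):
--         dp += [[]]
--         for j in range(0,n+1,1):
--             dp[i] += [0]
--
--     for i in range(1,m+1,1):
--         dp[i][0] = i
--     for j in range(1,n+1,1):
--         dp[0][j] = j
--
--     for j in range(1,n+1,1):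
--         for i in range(1,m+1,1):
--             if s1[i-1] == s2[j-1]:
--                 substitutionCost = 0
--             else:
--                 substitutionCost = 1
--
--             dp[i][j] = min(dp[i-1][j] + 1, dp[i][j-1] + 1, dp[i-1][j-1] + substitutionCost)
--     return dp
-- ===== SOURCE B (Python) =====
-- def compute_DP_matrix(s1, s2):
--     """Top-down memoized recursion: each cell computed on demand by the recurrence."""
--     memo = {}
--
--     def dist(i, j):
--         if i == 0:
--             return j
--         if j == 0:
--             return i
--         if (i, j) not in memo:
--             cost = 0 if s1[i - 1] == s2[j - 1] else 1
--             memo[(i, j)] = min(dist(i - 1, j) + 1, dist(i, j - 1) + 1, dist(i - 1, j - 1) + cost)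
--         return memo[(i, j)]
--
--     return [[dist(i, j) for j in range(len(s2) + 1)] for i in range(len(s1) + 1)]
-- ===== Notes on version B (the rewrite author's own statement) =====
-- stated objective: alternative
-- what changed: Replaces the staged bottom-up loops mutating a preallocated matrix by top-down memoized recursion: a recursive dist(i,j) with base cases and a dictionary memo, the matrix assembled by demanding each cell from it.
import Mathlib
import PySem

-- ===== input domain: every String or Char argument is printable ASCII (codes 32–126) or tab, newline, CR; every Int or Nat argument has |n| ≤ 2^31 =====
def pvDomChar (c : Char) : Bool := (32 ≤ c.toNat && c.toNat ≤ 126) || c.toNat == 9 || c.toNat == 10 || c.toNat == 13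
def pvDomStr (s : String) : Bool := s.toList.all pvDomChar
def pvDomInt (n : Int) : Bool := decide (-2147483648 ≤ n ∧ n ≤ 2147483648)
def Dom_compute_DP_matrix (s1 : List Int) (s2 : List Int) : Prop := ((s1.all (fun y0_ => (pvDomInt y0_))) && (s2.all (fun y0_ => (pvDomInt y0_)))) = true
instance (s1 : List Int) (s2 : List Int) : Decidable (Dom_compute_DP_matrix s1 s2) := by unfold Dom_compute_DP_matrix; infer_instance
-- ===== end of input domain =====

-- B solves the same table top-down: a memoized recursive dist(i,j) with a dictionary,
-- the matrix assembled by demanding each cell; A fills an index-addressed matrix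
-- bottom-up in staged loops. Same return value (proved below).

-- ===== PORT A =====
-- literal transliteration of A: build an (m+1)×(n+1) zero table by appending,
-- set first column and first row, then fill column-major (j outer, i inner) in place.
def compute_DP_matrix (s1 : List Int) (s2 : List Int) : List (List Int) :=
  let m := s1.length
  let n := s2.length
  let dp : List (List Int) := []
  let dp := (List.range (m+1)).foldl (fun dp i =>
      let dp := dp ++ [[]]
      (List.range (n+1)).foldl (fun dp _j => dp.set i (dp.getD i [] ++ [0])) dp) dp
  let dp := (List.range' 1 m).foldl (fun dp i => dp.set i ((dp.getD i []).set 0 (i : Int))) dp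
  let dp := (List.range' 1 n).foldl (fun dp j => dp.set 0 ((dp.getD 0 []).set j (j : Int))) dp
  let dp := (List.range' 1 n).foldl (fun dp j =>
      (List.range' 1 m).foldl (fun dp i =>
        dp.set i ((dp.getD i []).set j
          (min (min ((dp.getD (i-1) []).getD j 0 + 1) ((dp.getD i []).getD (j-1) 0 + 1))
               ((dp.getD (i-1) []).getD (j-1) 0 +
                 (if s1.getD (i-1) 0 = s2.getD (j-1) 0 then (0:Int) else 1))))) dp) dp
  dp

-- ===== PORT B =====
-- literal transliteration of Source B's dist(i,j): base cases return directly; otherwise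
-- on a memo miss compute cost, recurse on the three predecessor cells (threading the
-- mutated memo), store, and return memo[(i,j)] (a getD: the key was just checked/inserted,
-- so Python's memo[(i,j)] cannot raise there).
def distB (s1 s2 : List Int) : Nat → Nat → PySem.Dict (Nat × Nat) Int → Int × PySem.Dict (Nat × Nat) Int
  | 0, j, memo => ((j : Int), memo)
  | i+1, 0, memo => (((i : Int) + 1), memo)
  | i+1, j+1, memo =>
      if memo.contains (i+1, j+1) then
        (memo.getD (i+1, j+1) 0, memo)
      else
        let cost : Int := if s1.getD i 0 = s2.getD j 0 then 0 else 1
        let r1 := distB s1 s2 i (j+1) memo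
        let r2 := distB s1 s2 (i+1) j r1.2
        let r3 := distB s1 s2 i j r2.2
        let memo' := r3.2.insert (i+1, j+1) (min (min (r1.1 + 1) (r2.1 + 1)) (r3.1 + cost))
        (memo'.getD (i+1, j+1) 0, memo')
  termination_by i j _ => (i, j)

-- the nested comprehension, threading the closure-mutated memo through both loops
def compute_DP_matrix_alt (s1 : List Int) (s2 : List Int) : List (List Int) :=
  ((List.range (s1.length + 1)).foldl (fun acc i =>
      let inner := (List.range (s2.length + 1)).foldl (fun racc j =>
          let r := distB s1 s2 i j racc.2
          (racc.1 ++ [r.1], r.2)) (([] : List Int), acc.2)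
      (acc.1 ++ [inner.1], inner.2)) (([] : List (List Int)), PySem.Dict.empty)).1

-- ===== PRECONDITION & SPEC =====
def Spec_compute_DP_matrix (s1 : List Int) (s2 : List Int) (out : List (List Int)) : Prop := out = compute_DP_matrix_alt s1 s2
instance (s1 : List Int) (s2 : List Int) (out : List (List Int)) : Decidable (Spec_compute_DP_matrix s1 s2 out) := by unfold Spec_compute_DP_matrix; infer_instance

-- ===== CLAIM (what is proved, stated in full; the proofs are below) =====
def Claim_equal_compute_DP_matrix : Prop := ∀ (s1 : List Int) (s2 : List Int), Dom_compute_DP_matrix s1 s2 → Spec_compute_DP_matrix s1 s2 (compute_DP_matrix s1 s2)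

-- ===== LEMMAS AND PROOFS =====

-- the common mathematical content: the edit-distance recurrence
def edF (s1 s2 : List Int) : Nat → Nat → Int
  | 0, j => (j : Int)
  | (i+1), 0 => ((i : Int) + 1)
  | (i+1), (j+1) =>
      min (min (edF s1 s2 i (j+1) + 1) (edF s1 s2 (i+1) j + 1))
          (edF s1 s2 i j + (if s1.getD i 0 = s2.getD j 0 then (0:Int) else 1))
  termination_by i j => (i, j)

theorem edF_zero_left (s1 s2 : List Int) (j : Nat) : edF s1 s2 0 j = (j : Int) := by
  cases j <;> simp [edF]

theorem edF_zero_right (s1 s2 : List Int) (i : Nat) : edF s1 s2 i 0 = (i : Int) := by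
  cases i <;> simp [edF]

theorem edF_succ (s1 s2 : List Int) (i j : Nat) :
    edF s1 s2 (i+1) (j+1)
      = min (min (edF s1 s2 i (j+1) + 1) (edF s1 s2 (i+1) j + 1))
            (edF s1 s2 i j + (if s1.getD i 0 = s2.getD j 0 then (0:Int) else 1)) := by
  rw [edF]

def mat (s1 s2 : List Int) (f : Nat → Nat → Int) : List (List Int) :=
  (List.range (s1.length + 1)).map (fun i => (List.range (s2.length + 1)).map (f i))

theorem mat_congr (s1 s2 : List Int) (f g : Nat → Nat → Int)
    (h : ∀ i j, i ≤ s1.length → j ≤ s2.length → f i j = g i j) :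
    mat s1 s2 f = mat s1 s2 g := by
  unfold mat
  refine List.map_congr_left (fun i hi => ?_)
  refine List.map_congr_left (fun j hj => ?_)
  exact h i j (Nat.lt_succ_iff.mp (List.mem_range.mp hi))
              (Nat.lt_succ_iff.mp (List.mem_range.mp hj))

theorem map_range_getD {α : Type} (N i : Nat) (f : Nat → α) (hi : i < N) (d : α) :
    ((List.range N).map f).getD i d = f i := by
  rw [List.getD_eq_getElem?_getD, List.getElem?_map, List.getElem?_range hi]
  rfl

theorem map_range_set {α : Type} (N i : Nat) (f : Nat → α) (v : α) :
    ((List.range N).map f).set i v = (List.range N).map (fun k => if k = i then v else f k) := by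
  apply List.ext_getElem
  · simp
  · intro k h1 h2
    have hk : k < N := by simpa using h2
    by_cases hki : k = i
    · subst hki
      simp
    · simp only [List.getElem_set, List.getElem_map, List.getElem_range]
      rw [if_neg (fun h => hki h.symm), if_neg hki]

theorem mat_getD (s1 s2 : List Int) (f : Nat → Nat → Int) (i : Nat) (hi : i ≤ s1.length) :
    (mat s1 s2 f).getD i [] = (List.range (s2.length + 1)).map (f i) :=
  map_range_getD _ i _ (Nat.lt_succ_of_le hi) []

theorem mat_cell (s1 s2 : List Int) (f : Nat → Nat → Int) (i j : Nat)
    (hi : i ≤ s1.length) (hj : j ≤ s2.length) :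
    ((mat s1 s2 f).getD i []).getD j 0 = f i j := by
  rw [mat_getD s1 s2 f i hi]
  exact map_range_getD _ j _ (Nat.lt_succ_of_le hj) 0

theorem mat_set (s1 s2 : List Int) (f : Nat → Nat → Int) (i j : Nat) (v : Int)
    (hi : i ≤ s1.length) :
    (mat s1 s2 f).set i (((mat s1 s2 f).getD i []).set j v)
      = mat s1 s2 (fun i' j' => if i' = i ∧ j' = j then v else f i' j') := by
  conv_lhs => rw [mat_getD s1 s2 f i hi, map_range_set]
  unfold mat
  rw [map_range_set]
  refine List.map_congr_left (fun i' _ => ?_)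
  by_cases hii : i' = i
  · subst hii
    rw [if_pos rfl]
    refine List.map_congr_left (fun j' _ => ?_)
    by_cases hjj : j' = j <;> simp [hjj]
  · simp only [if_neg hii]
    refine List.map_congr_left (fun j' _ => ?_)
    simp [hii]

-- ---------- A-side: the build loop produces the all-zero matrix ----------
theorem append_getD (dp0 : List (List Int)) (r : List Int) :
    (dp0 ++ [r]).getD dp0.length [] = r := by
  induction dp0 with
  | nil => rfl
  | cons a t ih => simp

theorem append_set (dp0 : List (List Int)) (r v : List Int) :
    (dp0 ++ [r]).set dp0.length v = dp0 ++ [v] := by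
  induction dp0 with
  | nil => rfl
  | cons a t ih => simp

theorem build_inner (i : Nat) (dp0 : List (List Int)) (hi : dp0.length = i) (l : List Nat) :
    ∀ (r : List Int),
      l.foldl (fun dp _j => dp.set i (dp.getD i [] ++ [(0:Int)])) (dp0 ++ [r])
        = dp0 ++ [r ++ List.replicate l.length 0] := by
  subst hi
  induction l with
  | nil => intro r; simp
  | cons x t ih =>
      intro r
      simp only [List.foldl_cons, append_getD dp0 r, append_set dp0 r (r ++ [0])]
      rw [ih (r ++ [0])]
      simp [List.replicate_succ]

theorem build_outer (n : Nat) : ∀ (k : Nat),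
    (List.range k).foldl (fun dp i =>
        (List.range (n+1)).foldl (fun dp _j => dp.set i (dp.getD i [] ++ [(0:Int)])) (dp ++ [[]])) []
      = List.replicate k (List.replicate (n+1) 0) := by
  intro k
  induction k with
  | zero => simp
  | succ k ih =>
      rw [List.range_succ (n := k), List.foldl_append, ih]
      simp only [List.foldl_cons, List.foldl_nil]
      rw [build_inner k (List.replicate k (List.replicate (n+1) (0:Int))) (by simp) (List.range (n+1)) []]
      simp [List.replicate_succ' (n := k)]

theorem replicate_eq_mat (s1 s2 : List Int) :
    List.replicate (s1.length + 1) (List.replicate (s2.length + 1) (0:Int))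
      = mat s1 s2 (fun _ _ => 0) := by
  unfold mat
  apply List.ext_getElem
  · simp
  · intro k h1 h2
    simp

-- ---------- A-side: phases 2 and 3 (first column, first row) ----------
def initF (i j : Nat) : Int := if i = 0 then (j : Int) else if j = 0 then (i : Int) else 0

theorem phase2 (s1 s2 : List Int) : ∀ (k : Nat), k ≤ s1.length →
    (List.range' 1 k).foldl (fun dp i => dp.set i ((dp.getD i []).set 0 (i : Int)))
        (mat s1 s2 (fun _ _ => 0))
      = mat s1 s2 (fun i j => if j = 0 ∧ 1 ≤ i ∧ i ≤ k then (i : Int) else 0) := by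
  intro k
  induction k with
  | zero =>
      intro _
      simp only [List.range'_zero, List.foldl_nil]
      apply mat_congr; intro i j _ _
      split_ifs <;> omega
  | succ k ih =>
      intro hk
      rw [List.range'_concat, one_mul, List.foldl_append, ih (Nat.le_of_succ_le hk)]
      simp only [List.foldl_cons, List.foldl_nil]
      rw [mat_set s1 s2 _ (1+k) 0 _ (by omega)]
      apply mat_congr
      intro i j _ _
      split_ifs <;> omega

theorem phase3 (s1 s2 : List Int) : ∀ (k : Nat), k ≤ s2.length →
    (List.range' 1 k).foldl (fun dp j => dp.set 0 ((dp.getD 0 []).set j (j : Int)))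
        (mat s1 s2 (fun i j => if j = 0 ∧ 1 ≤ i ∧ i ≤ s1.length then (i : Int) else 0))
      = mat s1 s2 (fun i j => if i = 0 ∧ 1 ≤ j ∧ j ≤ k then (j : Int)
                              else if j = 0 ∧ 1 ≤ i ∧ i ≤ s1.length then (i : Int) else 0) := by
  intro k
  induction k with
  | zero =>
      intro _
      simp only [List.range'_zero, List.foldl_nil]
      apply mat_congr; intro i j _ _
      split_ifs <;> omega
  | succ k ih =>
      intro hk
      rw [List.range'_concat, one_mul, List.foldl_append, ih (Nat.le_of_succ_le hk)]
      simp only [List.foldl_cons, List.foldl_nil]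
      rw [mat_set s1 s2 _ 0 (1+k) _ (by omega)]
      apply mat_congr
      intro i j _ _
      split_ifs <;> omega

-- ---------- A-side: the main column-major fill ----------
theorem inner_fill (s1 s2 : List Int) (j : Nat) (hj1 : 1 ≤ j) (hj2 : j ≤ s2.length) :
    ∀ (k : Nat), k ≤ s1.length →
    (List.range' 1 k).foldl (fun dp i =>
        dp.set i ((dp.getD i []).set j
          (min (min ((dp.getD (i-1) []).getD j 0 + 1) ((dp.getD i []).getD (j-1) 0 + 1))
               ((dp.getD (i-1) []).getD (j-1) 0 +
                 (if s1.getD (i-1) 0 = s2.getD (j-1) 0 then (0:Int) else 1)))))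
      (mat s1 s2 (fun i' j' => if j' < j ∨ (j' = j ∧ i' = 0) then edF s1 s2 i' j' else initF i' j'))
      = mat s1 s2 (fun i' j' => if j' < j ∨ (j' = j ∧ i' ≤ k) then edF s1 s2 i' j' else initF i' j') := by
  intro k
  induction k with
  | zero =>
      intro _
      simp only [List.range'_zero, List.foldl_nil]
      apply mat_congr; intro i' j' _ _
      beta_reduce
      split_ifs <;> first | rfl | omega
  | succ k ih =>
      intro hk
      rw [List.range'_concat, one_mul, List.foldl_append, ih (Nat.le_of_succ_le hk)]
      simp only [List.foldl_cons, List.foldl_nil]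
      set G : Nat → Nat → Int :=
        fun i' j' => if j' < j ∨ (j' = j ∧ i' ≤ k) then edF s1 s2 i' j' else initF i' j' with hG
      have hup : ((mat s1 s2 G).getD (1+k-1) []).getD j 0 = edF s1 s2 k j := by
        rw [show 1+k-1 = k by omega, mat_cell s1 s2 G k j (by omega) hj2, hG]
        exact if_pos (Or.inr ⟨rfl, le_refl k⟩)
      have hleft : ((mat s1 s2 G).getD (1+k) []).getD (j-1) 0 = edF s1 s2 (k+1) (j-1) := by
        rw [mat_cell s1 s2 G (1+k) (j-1) (by omega) (by omega), hG]
        rw [show 1+k = k+1 by omega]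
        exact if_pos (Or.inl (by omega))
      have hdiag : ((mat s1 s2 G).getD (1+k-1) []).getD (j-1) 0 = edF s1 s2 k (j-1) := by
        rw [show 1+k-1 = k by omega, mat_cell s1 s2 G k (j-1) (by omega) (by omega), hG]
        exact if_pos (Or.inl (by omega))
      rw [hup, hleft, hdiag, mat_set s1 s2 G (1+k) j _ (by omega)]
      apply mat_congr
      intro i' j' _ _
      by_cases h : i' = 1 + k ∧ j' = j
      · rw [if_pos h, if_pos (Or.inr ⟨h.2, by omega⟩), h.1, h.2]
        obtain ⟨jp, hjp⟩ : ∃ jp, j = jp + 1 := ⟨j - 1, by omega⟩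
        rw [hjp, show 1 + k = k + 1 by omega, edF_succ]
        simp only [Nat.add_sub_cancel]
      · rw [if_neg h]
        simp only [hG]
        split_ifs <;> first | rfl | omega

theorem outer_fill (s1 s2 : List Int) : ∀ (k : Nat), k ≤ s2.length →
    (List.range' 1 k).foldl (fun dp j =>
        (List.range' 1 s1.length).foldl (fun dp i =>
          dp.set i ((dp.getD i []).set j
            (min (min ((dp.getD (i-1) []).getD j 0 + 1) ((dp.getD i []).getD (j-1) 0 + 1))
                 ((dp.getD (i-1) []).getD (j-1) 0 +
                   (if s1.getD (i-1) 0 = s2.getD (j-1) 0 then (0:Int) else 1))))) dp)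
      (mat s1 s2 initF)
      = mat s1 s2 (fun i' j' => if j' ≤ k then edF s1 s2 i' j' else initF i' j') := by
  intro k
  induction k with
  | zero =>
      intro _
      simp only [List.range'_zero, List.foldl_nil]
      apply mat_congr; intro i' j' _ _
      rw [eq_comm]
      by_cases h : j' ≤ 0
      · rw [if_pos h, show j' = 0 by omega, edF_zero_right]
        unfold initF
        by_cases h0 : i' = 0 <;> simp [h0]
      · rw [if_neg h]
  | succ k ih =>
      intro hk
      rw [List.range'_concat, one_mul, List.foldl_append, ih (Nat.le_of_succ_le hk)]
      simp only [List.foldl_cons, List.foldl_nil]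
      have hstart :
          mat s1 s2 (fun i' j' => if j' ≤ k then edF s1 s2 i' j' else initF i' j')
            = mat s1 s2 (fun i' j' => if j' < 1+k ∨ (j' = 1+k ∧ i' = 0) then edF s1 s2 i' j' else initF i' j') := by
        apply mat_congr; intro i' j' _ _
        by_cases h : j' ≤ k
        · rw [if_pos h, if_pos (Or.inl (by omega))]
        · rw [if_neg h]
          by_cases h2 : j' = 1+k ∧ i' = 0
          · rw [if_pos (Or.inr h2), h2.2, edF_zero_left]
            unfold initF; simp
          · rw [if_neg (by omega)]
      rw [hstart, inner_fill s1 s2 (1+k) (by omega) (by omega) s1.length (le_refl _)]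
      apply mat_congr
      intro i' j' hi' _
      beta_reduce
      split_ifs <;> first | rfl | omega

-- A's port equals the full edF matrix
theorem portA_eq_mat (s1 s2 : List Int) : compute_DP_matrix s1 s2 = mat s1 s2 (edF s1 s2) := by
  simp only [compute_DP_matrix]
  rw [build_outer s2.length (s1.length + 1), replicate_eq_mat s1 s2,
      phase2 s1 s2 s1.length (le_refl _), phase3 s1 s2 s2.length (le_refl _)]
  have hinit :
      mat s1 s2 (fun i j => if i = 0 ∧ 1 ≤ j ∧ j ≤ s2.length then (j : Int)
                            else if j = 0 ∧ 1 ≤ i ∧ i ≤ s1.length then (i : Int) else 0)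
        = mat s1 s2 initF := by
    apply mat_congr; intro i j hi hj
    unfold initF
    by_cases h0 : i = 0
    · subst h0
      by_cases hj0 : j = 0
      · subst hj0; simp
      · rw [if_pos ⟨rfl, by omega, hj⟩, if_pos rfl]
    · rw [if_neg (by omega), if_neg h0]
      by_cases hj0 : j = 0
      · rw [if_pos ⟨hj0, by omega, hi⟩, if_pos hj0]
      · rw [if_neg (by omega), if_neg hj0]
  rw [hinit, outer_fill s1 s2 s2.length (le_refl _)]
  apply mat_congr
  intro i j _ hj
  rw [if_pos hj]

-- ---------- B-side: memo invariant and the value of distB ----------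
def InvB (s1 s2 : List Int) (memo : PySem.Dict (Nat × Nat) Int) : Prop :=
  ∀ a b v, memo.get? (a, b) = some v → v = edF s1 s2 a b

theorem invB_empty (s1 s2 : List Int) : InvB s1 s2 PySem.Dict.empty := by
  intro a b v h
  rw [PySem.Dict.get?_empty] at h
  exact absurd h (by simp)

theorem getD_of_invB (s1 s2 : List Int) (memo : PySem.Dict (Nat × Nat) Int) (a b : Nat)
    (hinv : InvB s1 s2 memo) (hc : memo.contains (a, b) = true) :
    memo.getD (a, b) 0 = edF s1 s2 a b := by
  rw [PySem.Dict.contains_eq_isSome_get?] at hc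
  obtain ⟨v, hv⟩ := Option.isSome_iff_exists.mp hc
  rw [PySem.Dict.getD_eq_get?_getD, hv]
  exact hinv a b v hv

theorem distB_spec (s1 s2 : List Int) : ∀ (i j : Nat) (memo : PySem.Dict (Nat × Nat) Int),
    InvB s1 s2 memo →
    (distB s1 s2 i j memo).1 = edF s1 s2 i j ∧ InvB s1 s2 (distB s1 s2 i j memo).2 := by
  intro i
  induction i with
  | zero =>
      intro j memo h
      rw [distB, edF_zero_left]
      exact ⟨rfl, h⟩
  | succ i ihi =>
      intro j
      induction j with
      | zero =>
          intro memo h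
          rw [distB, edF_zero_right]
          exact ⟨by push_cast; ring, h⟩
      | succ j ihj =>
          intro memo h
          rw [distB]
          by_cases hc : memo.contains (i+1, j+1) = true
          · rw [if_pos hc]
            exact ⟨getD_of_invB s1 s2 memo (i+1) (j+1) h hc, h⟩
          · rw [if_neg hc]
            obtain ⟨h1, hInv1⟩ := ihi (j+1) memo h
            obtain ⟨h2, hInv2⟩ := ihj _ hInv1
            obtain ⟨h3, hInv3⟩ := ihi j _ hInv2
            simp only
            constructor
            · rw [PySem.Dict.getD_insert_self, h1, h2, h3, edF_succ]
            · intro a b v hv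
              rw [PySem.Dict.get?_insert] at hv
              by_cases hab : (a, b) = ((i+1 : Nat), (j+1 : Nat))
              · rw [if_pos hab] at hv
                obtain ⟨ha, hb⟩ := Prod.mk.injEq .. ▸ hab
                subst ha; subst hb
                injection hv with hv
                rw [← hv, h1, h2, h3, edF_succ]
              · rw [if_neg hab] at hv
                exact hInv3 a b v hv

-- ---------- B-side: the two foldl comprehension loops ----------
theorem innerB (s1 s2 : List Int) (i : Nat) (l : List Nat) :
    ∀ (r0 : List Int) (memo : PySem.Dict (Nat × Nat) Int), InvB s1 s2 memo →
      (l.foldl (fun racc j =>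
          let r := distB s1 s2 i j racc.2
          (racc.1 ++ [r.1], r.2)) (r0, memo)).1 = r0 ++ l.map (fun j => edF s1 s2 i j)
      ∧ InvB s1 s2 (l.foldl (fun racc j =>
          let r := distB s1 s2 i j racc.2
          (racc.1 ++ [r.1], r.2)) (r0, memo)).2 := by
  induction l with
  | nil => intro r0 memo h; exact ⟨by simp, h⟩
  | cons x t ih =>
      intro r0 memo h
      obtain ⟨hv, hInv⟩ := distB_spec s1 s2 i x memo h
      simp only [List.foldl_cons]
      obtain ⟨ha, hb⟩ := ih (r0 ++ [(distB s1 s2 i x memo).1]) _ hInv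
      refine ⟨?_, hb⟩
      rw [ha, hv]
      simp

theorem outerB (s1 s2 : List Int) (l : List Nat) :
    ∀ (rows0 : List (List Int)) (memo : PySem.Dict (Nat × Nat) Int), InvB s1 s2 memo →
      (l.foldl (fun acc i =>
          let inner := (List.range (s2.length + 1)).foldl (fun racc j =>
              let r := distB s1 s2 i j racc.2
              (racc.1 ++ [r.1], r.2)) (([] : List Int), acc.2)
          (acc.1 ++ [inner.1], inner.2)) (rows0, memo)).1
        = rows0 ++ l.map (fun i => (List.range (s2.length + 1)).map (fun j => edF s1 s2 i j)) := by
  induction l with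
  | nil => intro rows0 memo _; simp
  | cons x t ih =>
      intro rows0 memo h
      obtain ⟨hrow, hInv⟩ := innerB s1 s2 x (List.range (s2.length + 1)) [] memo h
      simp only [List.foldl_cons]
      rw [ih _ _ hInv, hrow]
      simp

theorem portB_eq_mat (s1 s2 : List Int) : compute_DP_matrix_alt s1 s2 = mat s1 s2 (edF s1 s2) := by
  simp only [compute_DP_matrix_alt]
  rw [outerB s1 s2 (List.range (s1.length + 1)) [] PySem.Dict.empty (invB_empty s1 s2)]
  rfl

-- ===== VERDICT (by name: the statement is the Claim_ definition above) =====
theorem compute_DP_matrix_spec : Claim_equal_compute_DP_matrix := by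
  intro s1 s2 _
  unfold Spec_compute_DP_matrix
  rw [portA_eq_mat, portB_eq_mat]
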